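-- pv_equiv track=rewrite | github.com/Thanga-Prasath/Cortex | components/system/audio_system.py | _fuzzy_match_name
-- ===== SOURCE A (Python) =====
-- def _fuzzy_match_name(query, candidates):
--     """Find the best matching candidate for query using token overlap."""
--     if not candidates:
--         return None
--
--     query_lower = query.lower()
--     query_tokens = query_lower.replace("(", " ").replace(")", " ").split()
--
--     best_match = None
--     best_score = 0
--
--     for candidate in candidates:
--         cand_lower = candidate.lower()
--         # Exact substring match wins immediately
--         if query_lower in cand_lower or cand_lower in query_lower:
--             return candidate
--         score = sum(1 for t in query_tokens if t in cand_lower)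
--         if score > best_score:
--             best_score = score
--             best_match = candidate
--
--     return best_match if best_score > 0 else None
-- ===== SOURCE B (Python) =====
-- def _fuzzy_match_name(query, candidates):
--     """Two separated passes: first substring match wins, else max token-overlap score."""
--     if not candidates:
--         return None
--     query_lower = query.lower()
--     sub = next((c for c in candidates
--                 if query_lower in c.lower() or c.lower() in query_lower), None)
--     if sub is not None:
--         return sub
--     tokens = query_lower.replace("(", " ").replace(")", " ").split()
--     scored = [(sum(1 for t in tokens if t in c.lower()), c) for c in candidates]
--     best_score, best = max(scored, key=lambda p: p[0])
--     return best if best_score > 0 else None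
-- ===== Notes on version B (the rewrite author's own statement) =====
-- stated objective: simpler
-- what changed: A's single interleaved loop (early-return substring check mixed with running best-score accumulator) is split into two separated passes: pass 1 returns the first substring match via next/find, and pass 2 builds an explicit score table and takes Python max (first maximal) gated by > 0.
import Mathlib
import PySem

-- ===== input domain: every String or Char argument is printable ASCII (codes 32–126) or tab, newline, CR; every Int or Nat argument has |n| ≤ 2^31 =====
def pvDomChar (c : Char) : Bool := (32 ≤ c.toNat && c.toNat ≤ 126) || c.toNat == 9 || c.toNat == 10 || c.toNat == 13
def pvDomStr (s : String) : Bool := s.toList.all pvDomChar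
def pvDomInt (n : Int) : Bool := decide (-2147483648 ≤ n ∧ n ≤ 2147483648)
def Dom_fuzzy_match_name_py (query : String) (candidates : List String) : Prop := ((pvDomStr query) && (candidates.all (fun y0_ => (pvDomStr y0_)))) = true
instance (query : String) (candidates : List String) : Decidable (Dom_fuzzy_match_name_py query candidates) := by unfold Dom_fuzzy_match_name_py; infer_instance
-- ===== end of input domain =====

-- B replaces A's single interleaved loop by two separated passes (first substring match,
-- else max of a score table); objective: simpler decomposition, same cost.

-- ===== PORT A =====
-- score = sum(1 for t in query_tokens if t in cand_lower)
def fuzzyScoreA (toks : List String) (cl : String) : Int :=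
  toks.foldl (fun a t => if PySem.Str.isIn t cl then a + 1 else a) 0

-- the interleaved for-loop of A, threading best_match / best_score
def fuzzyLoopA (ql : String) (toks : List String) :
    List String → Option String → Int → Option String
  | [], best, bestScore => if bestScore > 0 then best else none
  | c :: rest, best, bestScore =>
    let cl := PySem.Str.lower c
    if PySem.Str.isIn ql cl || PySem.Str.isIn cl ql then some c
    else
      let s := fuzzyScoreA toks cl
      if s > bestScore then fuzzyLoopA ql toks rest (some c) s
      else fuzzyLoopA ql toks rest best bestScore

def fuzzy_match_name_py (query : String) (candidates : List String) : Option String :=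
  if candidates = [] then none
  else
    let ql := PySem.Str.lower query
    let toks := PySem.Str.split₀ (PySem.Str.replace (PySem.Str.replace ql "(" " ") ")" " ")
    fuzzyLoopA ql toks candidates none 0

-- ===== PORT B =====
-- (B's per-candidate score is the same expression as A's; the shared helper fuzzyScoreA is reused)
def fuzzy_match_name_py_alt (query : String) (candidates : List String) : Option String :=
  if candidates = [] then none
  else
    let ql := PySem.Str.lower query
    -- pass 1: first candidate matching by substring (either direction)
    match candidates.find? (fun c => PySem.Str.isIn ql (PySem.Str.lower c) || PySem.Str.isIn (PySem.Str.lower c) ql) with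
    | some c => some c
    | none =>
      -- pass 2: score table, then Python max (first maximal) gated by > 0
      let toks := PySem.Str.split₀ (PySem.Str.replace (PySem.Str.replace ql "(" " ") ")" " ")
      let scored := candidates.map (fun c => (fuzzyScoreA toks (PySem.Str.lower c), c))
      match PySem.List.max? scored (fun p => p.1) with
      | some (s, best) => if s > 0 then some best else none
      | none => none

-- ===== PRECONDITION & SPEC =====
def Spec_fuzzy_match_name_py (query : String) (candidates : List String) (out : Option String) : Prop := out = fuzzy_match_name_py_alt query candidates
instance (query : String) (candidates : List String) (out : Option String) : Decidable (Spec_fuzzy_match_name_py query candidates out) := by unfold Spec_fuzzy_match_name_py; infer_instance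

-- ===== CLAIM (what is proved, stated in full; the proofs are below) =====
def Claim_equal_fuzzy_match_name_py : Prop := ∀ (query : String) (candidates : List String), Dom_fuzzy_match_name_py query candidates → Spec_fuzzy_match_name_py query candidates (fuzzy_match_name_py query candidates)

-- ===== LEMMAS AND PROOFS =====

-- the fold step of PySem.List.max? with key = Prod.fst
def pvMStep (acc : Option (Int × String)) (x : Int × String) : Option (Int × String) :=
  match acc with
  | none => some x
  | some m => if m.1 < x.1 then some x else some m

lemma max?_fst_eq_foldl (xs : List (Int × String)) :
    PySem.List.max? xs (fun p => p.1) = xs.foldl pvMStep none := by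
  unfold PySem.List.max? pvMStep
  congr 1
  funext acc x
  cases acc <;> rfl

lemma fuzzyScoreA_nonneg (toks : List String) (cl : String) : 0 ≤ fuzzyScoreA toks cl := by
  unfold fuzzyScoreA
  suffices h : ∀ (l : List String) (a : Int), 0 ≤ a →
      0 ≤ l.foldl (fun a t => if PySem.Str.isIn t cl then a + 1 else a) a from
    h toks 0 le_rfl
  intro l
  induction l with
  | nil => intro a ha; exact ha
  | cons t l ih =>
    intro a ha
    simp only [List.foldl_cons]
    split <;> [exact ih _ (by omega); exact ih _ ha]

-- the accumulator relation between A's (best, bestScore) and B's running max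
def pvRel (best : Option String) (bs : Int) (acc : Option (Int × String)) : Prop :=
  match acc with
  | none => best = none ∧ bs = 0
  | some (s, m) => (0 < s ∧ best = some m ∧ bs = s) ∨ (s = 0 ∧ best = none ∧ bs = 0)

lemma loopA_eq_two_pass (ql : String) (toks : List String) :
    ∀ (cs : List String) (best : Option String) (bs : Int) (acc : Option (Int × String)),
      pvRel best bs acc →
      fuzzyLoopA ql toks cs best bs =
        match cs.find? (fun c => PySem.Str.isIn ql (PySem.Str.lower c) || PySem.Str.isIn (PySem.Str.lower c) ql) with
        | some c => some c
        | none =>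
          match (cs.map (fun c => (fuzzyScoreA toks (PySem.Str.lower c), c))).foldl pvMStep acc with
          | some (s, b) => if s > 0 then some b else none
          | none => none := by
  intro cs
  induction cs with
  | nil =>
    intro best bs acc hrel
    simp only [fuzzyLoopA, List.find?_nil, List.map_nil, List.foldl_nil]
    cases acc with
    | none =>
      obtain ⟨hb, hs⟩ := hrel; subst hb; subst hs; simp
    | some p =>
      obtain ⟨s, m⟩ := p
      simp only [pvRel] at hrel
      rcases hrel with ⟨hs, hb, hbs⟩ | ⟨hs, hb, hbs⟩
      · subst hb; subst hbs; simp [hs]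
      · subst hs; subst hb; subst hbs; simp
  | cons c rest ih =>
    intro best bs acc hrel
    cases hb : (PySem.Str.isIn ql (PySem.Str.lower c) || PySem.Str.isIn (PySem.Str.lower c) ql) with
    | true =>
      simp only [fuzzyLoopA, List.find?_cons, hb]
      simp
    | false =>
      simp only [fuzzyLoopA, List.find?_cons, hb, List.map_cons, List.foldl_cons,
        Bool.false_eq_true, if_false]
      have hnn : 0 ≤ fuzzyScoreA toks (PySem.Str.lower c) := fuzzyScoreA_nonneg toks _
      cases acc with
      | none =>
        obtain ⟨hbest, hbs⟩ := hrel; subst hbest; subst hbs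
        simp only [pvMStep]
        by_cases hpos : fuzzyScoreA toks (PySem.Str.lower c) > 0
        · rw [if_pos hpos]
          exact ih (some c) _ (some (fuzzyScoreA toks (PySem.Str.lower c), c)) (Or.inl ⟨hpos, rfl, rfl⟩)
        · rw [if_neg hpos]
          have ht0 : fuzzyScoreA toks (PySem.Str.lower c) = 0 := le_antisymm (by omega) hnn
          exact ih none 0 (some (fuzzyScoreA toks (PySem.Str.lower c), c)) (Or.inr ⟨ht0, rfl, rfl⟩)
      | some p =>
        obtain ⟨s, m⟩ := p
        simp only [pvRel] at hrel
        rcases hrel with ⟨hs, hbest, hbs⟩ | ⟨hs, hbest, hbs⟩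
        · subst hbest; subst hbs
          simp only [pvMStep]
          by_cases hlt : bs < fuzzyScoreA toks (PySem.Str.lower c)
          · rw [if_pos hlt, if_pos hlt]
            exact ih (some c) _ (some (fuzzyScoreA toks (PySem.Str.lower c), c)) (Or.inl ⟨by omega, rfl, rfl⟩)
          · rw [if_neg hlt, if_neg hlt]
            exact ih (some m) bs (some (bs, m)) (Or.inl ⟨hs, rfl, rfl⟩)
        · subst hs; subst hbest; subst hbs
          simp only [pvMStep]
          by_cases hpos : fuzzyScoreA toks (PySem.Str.lower c) > 0
          · rw [if_pos hpos, if_pos hpos]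
            exact ih (some c) _ (some (fuzzyScoreA toks (PySem.Str.lower c), c)) (Or.inl ⟨hpos, rfl, rfl⟩)
          · rw [if_neg hpos, if_neg hpos]
            exact ih none 0 (some (0, m)) (Or.inr ⟨rfl, rfl, rfl⟩)

-- ===== VERDICT (by name: the statement is the Claim_ definition above) =====
theorem fuzzy_match_name_py_spec : Claim_equal_fuzzy_match_name_py := by
  intro query candidates _
  unfold Spec_fuzzy_match_name_py fuzzy_match_name_py fuzzy_match_name_py_alt
  by_cases hc : candidates = []
  · simp [hc]
  · simp only [if_neg hc]
    rw [max?_fst_eq_foldl]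
    exact loopA_eq_two_pass _ _ candidates none 0 none ⟨rfl, rfl⟩
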